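-- pv_equiv track=rewrite | github.com/simplic/simplic-oxs-sdk | templates/inject.py | find_end_of_usings
-- ===== SOURCE A (Python) =====
-- def find_end_of_usings(lines: list[str]) -> int:
--     i = 0
--     found_usings = False
--     for line in lines:
--         if line.startswith("using"):
--             found_usings = True
--         elif found_usings:
--             return i
--
--         i += 1
--
--     return i
-- ===== SOURCE B (Python) =====
-- def find_end_of_usings(lines: list[str]) -> int:
--     # Map each line to a boolean flag, then look for the first "descent":
--     # a using-line immediately followed by a non-using line.  The end of the
--     # leading using block is always right after such a descent (every line
--     # between the first using line and the answer starts with "using").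
--     flags = [line.startswith("using") for line in lines]
--     for i, (a, b) in enumerate(zip(flags, flags[1:])):
--         if a and not b:
--             return i + 1
--     return len(lines)
-- ===== Notes on version B (the rewrite author's own statement) =====
-- stated objective: alternative
-- what changed: B first maps every line to a startswith-'using' boolean and then searches the flag sequence for the first True-followed-by-False adjacent pair (a 'descent'), returning the index just after it; A instead threads a found_usings flag through a single loop over the lines.
import Mathlib
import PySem

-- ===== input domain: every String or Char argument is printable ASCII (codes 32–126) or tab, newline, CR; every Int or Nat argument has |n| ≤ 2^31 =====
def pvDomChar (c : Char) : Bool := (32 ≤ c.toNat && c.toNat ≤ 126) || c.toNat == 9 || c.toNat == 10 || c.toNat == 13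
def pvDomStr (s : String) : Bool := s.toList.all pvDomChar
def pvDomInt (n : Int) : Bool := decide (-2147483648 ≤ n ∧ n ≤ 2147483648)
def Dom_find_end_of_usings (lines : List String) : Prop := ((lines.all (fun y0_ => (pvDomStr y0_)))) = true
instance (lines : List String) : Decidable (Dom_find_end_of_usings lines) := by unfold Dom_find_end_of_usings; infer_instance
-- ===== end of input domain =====

-- B maps the lines to startswith-"using" booleans once and then searches that flag
-- sequence for the first True-followed-by-False adjacent pair; A threads a
-- found_usings flag through a single loop (alternative decomposition, same cost).

-- ===== PORT A =====
-- A's flag-driven for-loop, step for step: i counter, found_usings flag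
def findEndGoA (lines : List String) (i : Int) (found : Bool) : Int :=
  match lines with
  | [] => i
  | l :: rest =>
    if PySem.Str.startswith l "using" then findEndGoA rest (i + 1) true
    else if found then i
    else findEndGoA rest (i + 1) found

def find_end_of_usings (lines : List String) : Int :=
  findEndGoA lines 0 false

-- ===== PORT B =====
-- for i, (a, b) in enumerate(zip(flags, flags[1:])): if a and not b: return i + 1
-- / return len(lines) — the zip walks the flag list two heads at a time.
def findDescent (fs : List Bool) (i : Int) (n : Int) : Int :=
  match fs with
  | a :: b :: rest => if a && !b then i + 1 else findDescent (b :: rest) (i + 1) n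
  | _ => n

def find_end_of_usings_alt (lines : List String) : Int :=
  let flags := lines.map (fun line => PySem.Str.startswith line "using")
  findDescent flags 0 (lines.length : Int)

-- ===== PRECONDITION & SPEC =====
def Spec_find_end_of_usings (lines : List String) (out : Int) : Prop := out = find_end_of_usings_alt lines
instance (lines : List String) (out : Int) : Decidable (Spec_find_end_of_usings lines out) := by unfold Spec_find_end_of_usings; infer_instance

-- ===== CLAIM (what is proved, stated in full; the proofs are below) =====
def Claim_equal_find_end_of_usings : Prop := ∀ (lines : List String), Dom_find_end_of_usings lines → Spec_find_end_of_usings lines (find_end_of_usings lines)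

-- ===== LEMMAS AND PROOFS =====

-- A's loop, abstracted to the boolean flags it branches on (proof helper).
def goA (fs : List Bool) (i : Int) (found : Bool) : Int :=
  match fs with
  | [] => i
  | a :: rest =>
    if a then goA rest (i + 1) true
    else if found then i
    else goA rest (i + 1) found

-- A's port is goA on the mapped flags.
theorem findEndGoA_eq_goA (lines : List String) (i : Int) (f : Bool) :
    findEndGoA lines i f = goA (lines.map (fun line => PySem.Str.startswith line "using")) i f := by
  induction lines generalizing i f with
  | nil => rfl
  | cons l rest ih =>
    simp only [findEndGoA, goA, List.map]
    by_cases hs : PySem.Str.startswith l "using" <;> simp [ih]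

-- With the flag already set and a true head, A's loop equals B's descent scan.
theorem goA_true_eq (rest : List Bool) (j n : Int) (hn : n = j + 1 + (rest.length : Int)) :
    goA (true :: rest) j true = findDescent (true :: rest) j n := by
  induction rest generalizing j n with
  | nil => simp [goA, findDescent, hn]
  | cons b rs ih =>
    cases b with
    | false => simp [goA, findDescent]
    | true =>
      have h1 : goA (true :: true :: rs) j true = goA (true :: rs) (j + 1) true := by
        simp [goA]
      have h2 : findDescent (true :: true :: rs) j n = findDescent (true :: rs) (j + 1) n := by
        simp [findDescent]
      rw [h1, h2, ih (j + 1) n (by simp at hn ⊢; omega)]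

-- With the flag unset, A's loop equals B's descent scan (n = end fall-through value).
theorem goA_false_eq (fs : List Bool) (i n : Int) (hn : n = i + (fs.length : Int)) :
    goA fs i false = findDescent fs i n := by
  induction fs generalizing i n with
  | nil => simp [goA, findDescent, hn]
  | cons a tl ih =>
    cases a with
    | false =>
      have h1 : goA (false :: tl) i false = goA tl (i + 1) false := by simp [goA]
      have h2 : findDescent (false :: tl) i n = findDescent tl (i + 1) n := by
        cases tl with
        | nil => simp [findDescent]
        | cons b rs => simp [findDescent]
      rw [h1, h2, ih (i + 1) n (by simp at hn ⊢; omega)]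
    | true =>
      cases tl with
      | nil => simp [goA, findDescent, hn]
      | cons b rs =>
        cases b with
        | false => simp [goA, findDescent]
        | true =>
          have h1 : goA (true :: true :: rs) i false = goA (true :: rs) (i + 1) true := by
            simp [goA]
          have h2 : findDescent (true :: true :: rs) i n = findDescent (true :: rs) (i + 1) n := by
            simp [findDescent]
          rw [h1, h2, goA_true_eq rs (i + 1) n (by simp at hn ⊢; omega)]

-- ===== VERDICT (by name: the statement is the Claim_ definition above) =====
theorem find_end_of_usings_spec : Claim_equal_find_end_of_usings := by
  intro lines _
  unfold Spec_find_end_of_usings find_end_of_usings find_end_of_usings_alt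
  rw [findEndGoA_eq_goA]
  exact goA_false_eq _ 0 _ (by simp)
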